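-- pv_equiv track=rewrite | github.com/SnowriterMYX/PPTAgent | pptagent/document/document.py | _format_user_input_to_markdown
-- ===== SOURCE A (Python) =====
-- def _format_user_input_to_markdown(user_text: str, title: str) -> str:
--     """将用户输入格式化为Markdown"""
--     lines = user_text.strip().split('\n')
--     formatted_lines = [f"# {title}", ""]
--
--     current_section = []
--     for line in lines:
--         line = line.strip()
--         if not line:
--             if current_section:
--                 formatted_lines.extend(current_section)
--                 formatted_lines.append("")
--                 current_section = []
--             continue
--
--         # 检测是否可能是标题（简单启发式）
--         if (len(line) < 50 and
--             not line.endswith('.') and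
--             not line.endswith(',') and
--             not line.endswith(';')):
--             # 可能是标题
--             if current_section:
--                 formatted_lines.extend(current_section)
--                 formatted_lines.append("")
--                 current_section = []
--             formatted_lines.append(f"## {line}")
--             formatted_lines.append("")
--         else:
--             current_section.append(line)
--
--     # 添加剩余内容
--     if current_section:
--         formatted_lines.extend(current_section)
--
--     return "\n".join(formatted_lines)
-- ===== SOURCE B (Python) =====
-- def _format_user_input_to_markdown(user_text: str, title: str) -> str:
--     # Parse phase: turn the stripped lines into tagged segments
--     # ('heading', text) / ('body', [lines...]), plus a trailing body.
--     segs, body = [], []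
--     for line in (raw.strip() for raw in user_text.strip().split('\n')):
--         if not line:
--             if body:
--                 segs.append(('body', body))
--                 body = []
--         elif len(line) < 50 and line[-1] not in '.,;':
--             if body:
--                 segs.append(('body', body))
--                 body = []
--             segs.append(('heading', line))
--         else:
--             body.append(line)
--     # Render phase: header, then each segment followed by a blank line,
--     # then the trailing (unterminated) body.
--     out = ['# ' + title, '']
--     for seg in segs:
--         if seg[0] == 'heading':
--             out += ['## ' + seg[1], '']
--         else:
--             out += seg[1] + ['']
--     out += body
--     return '\n'.join(out)
-- ===== Notes on version B (the rewrite author's own statement) =====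
-- stated objective: alternative
-- what changed: Replaced A's single stateful emit-loop (which interleaves classification with output construction and flush bookkeeping) by a two-phase parse-then-render design: one pass builds tagged segments ('heading'/'body') with a trailing body, a second pass renders the segment list to markdown.
import Mathlib
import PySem

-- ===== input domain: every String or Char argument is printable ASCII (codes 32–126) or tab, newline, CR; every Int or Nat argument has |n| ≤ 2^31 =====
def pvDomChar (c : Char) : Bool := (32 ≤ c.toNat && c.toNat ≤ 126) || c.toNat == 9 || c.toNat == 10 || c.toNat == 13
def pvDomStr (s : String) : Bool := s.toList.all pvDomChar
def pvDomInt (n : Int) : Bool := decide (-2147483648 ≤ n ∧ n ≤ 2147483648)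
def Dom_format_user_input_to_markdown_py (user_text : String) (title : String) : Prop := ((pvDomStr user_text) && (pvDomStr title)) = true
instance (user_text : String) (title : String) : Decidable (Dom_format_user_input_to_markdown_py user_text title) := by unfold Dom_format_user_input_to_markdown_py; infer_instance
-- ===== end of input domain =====

-- B replaces A's single stateful emit-loop by a parse-then-render two-phase design (same cost; objective: alternative).

-- ===== PORT A =====
-- heading heuristic of A: short and not ending in '.', ',' or ';'
def pvHeadA (line : String) : Bool :=
  decide (PySem.Str.len line < 50) && !(PySem.Str.endswith line ".") &&
    !(PySem.Str.endswith line ",") && !(PySem.Str.endswith line ";")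

-- loop body of A: state = (formatted_lines, current_section)
def pvStepA (st : List String × List String) (line0 : String) : List String × List String :=
  let line := PySem.Str.strip line0
  if line = "" then
    if st.2 ≠ [] then (st.1 ++ st.2 ++ [""], []) else st
  else if pvHeadA line then
    let fl := if st.2 ≠ [] then st.1 ++ st.2 ++ [""] else st.1
    (fl ++ ["## " ++ line, ""], [])
  else
    (st.1, st.2 ++ [line])

def format_user_input_to_markdown_py (user_text : String) (title : String) : String :=
  let lines := (PySem.Str.split? (PySem.Str.strip user_text) "\n").getD []
  let st := lines.foldl pvStepA (["# " ++ title, ""], [])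
  let fl := if st.2 ≠ [] then st.1 ++ st.2 else st.1
  PySem.Str.join "\n" fl

-- ===== PORT B =====
-- tagged segment: ('heading', text) or ('body', lines)
inductive PVSeg where
  | heading (t : String)
  | body (ls : List String)
deriving DecidableEq, Repr

-- B's heading test: short and last char not in '.,;'  (line[-1] via pyGet?)
def pvHeadB (line : String) : Bool :=
  decide (PySem.Str.len line < 50) &&
    (match PySem.Str.pyGet? line (-1) with
     | some c => !(['.', ',', ';'].contains c)
     | none => false)

-- B's parse step: state = (segments, pending body)
def pvStepB (st : List PVSeg × List String) (line : String) : List PVSeg × List String :=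
  if line = "" then
    if st.2 ≠ [] then (st.1 ++ [.body st.2], []) else st
  else if pvHeadB line then
    let segs := if st.2 ≠ [] then st.1 ++ [.body st.2] else st.1
    (segs ++ [.heading line], [])
  else
    (st.1, st.2 ++ [line])

-- B's render step: each segment followed by a blank line
def pvRenderStep (out : List String) (seg : PVSeg) : List String :=
  match seg with
  | .heading t => out ++ ["## " ++ t, ""]
  | .body ls => out ++ ls ++ [""]

def format_user_input_to_markdown_py_alt (user_text : String) (title : String) : String :=
  let lines := ((PySem.Str.split? (PySem.Str.strip user_text) "\n").getD []).map PySem.Str.strip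
  let st := lines.foldl pvStepB ([], [])
  let out := st.1.foldl pvRenderStep (["# " ++ title, ""])
  PySem.Str.join "\n" (out ++ st.2)

-- ===== PRECONDITION & SPEC =====
def Spec_format_user_input_to_markdown_py (user_text : String) (title : String) (out : String) : Prop := out = format_user_input_to_markdown_py_alt user_text title
instance (user_text : String) (title : String) (out : String) : Decidable (Spec_format_user_input_to_markdown_py user_text title out) := by unfold Spec_format_user_input_to_markdown_py; infer_instance

-- ===== CLAIM (what is proved, stated in full; the proofs are below) =====
def Claim_equal_format_user_input_to_markdown_py : Prop := ∀ (user_text : String) (title : String), Dom_format_user_input_to_markdown_py user_text title → Spec_format_user_input_to_markdown_py user_text title (format_user_input_to_markdown_py user_text title)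

-- ===== LEMMAS AND PROOFS =====

-- one rendered segment, as a function (pvRenderStep out seg = out ++ pvSegOut seg)
def pvSegOut (seg : PVSeg) : List String :=
  match seg with
  | .heading t => ["## " ++ t, ""]
  | .body ls => ls ++ [""]

lemma pvRenderStep_eq (out : List String) (seg : PVSeg) :
    pvRenderStep out seg = out ++ pvSegOut seg := by
  cases seg <;> simp [pvRenderStep, pvSegOut]

lemma pvRender_flatMap (segs : List PVSeg) (out : List String) :
    segs.foldl pvRenderStep out = out ++ segs.flatMap pvSegOut := by
  have : segs.foldl pvRenderStep out = segs.foldl (fun a s => a ++ pvSegOut s) out := by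
    induction segs generalizing out with
    | nil => rfl
    | cons s ss ih => simp [List.foldl_cons, pvRenderStep_eq, ih]
  rw [this, PySem.List.foldl_append_eq_flatMap]

lemma singleton_suffix_iff (l : List Char) (a : Char) :
    ([a] <:+ l) ↔ l.getLast? = some a := by
  constructor
  · rintro ⟨t, rfl⟩
    simp [List.getLast?_append]
  · intro h
    obtain ⟨l', rfl⟩ := (List.getLast?_eq_some_iff).1 h
    exact ⟨l', rfl⟩

-- for a nonempty line the two heading tests agree
set_option maxRecDepth 10000 in
lemma pvHead_eq (line : String) (h : line ≠ "") : pvHeadA line = pvHeadB line := by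
  have hne : line.toList ≠ [] := fun hc => h (by
    have := congrArg String.ofList hc
    simpa using this)
  obtain ⟨c, hc⟩ := List.getLast?_isSome.2 hne |> Option.isSome_iff_exists.1
  have e : ∀ a : Char, PySem.Chars.endswith line.toList [a] = (c == a) := by
    intro a
    have hiff : PySem.Chars.endswith line.toList [a] = true ↔ c = a := by
      rw [PySem.Chars.endswith_iff, singleton_suffix_iff, hc, Option.some_inj, eq_comm]
    by_cases hca : c = a
    · rw [hiff.2 hca]
      simp [hca]
    · have hE : PySem.Chars.endswith line.toList [a] = false :=
        Bool.eq_false_iff.2 (fun ht => hca (hiff.1 ht))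
      rw [hE]
      simp [hca]
  unfold pvHeadA pvHeadB
  simp only [PySem.Str.endswith_eq, PySem.Str.pyGet?_eq, PySem.Chars.pyGet?_eq_listPyGet?,
    PySem.List.pyGet?_neg_one, hc]
  have ed : ("." : String).toList = ['.'] := by decide
  have ec : ("," : String).toList = [','] := by decide
  have es : (";" : String).toList = [';'] := by decide
  rw [ed, ec, es, e, e, e]
  by_cases h1 : c = '.' <;> by_cases h2 : c = ',' <;> by_cases h3 : c = ';' <;>
    [skip; skip; skip; skip; skip; skip; skip;
     (have e1 : (c == '.') = false := beq_eq_false_iff_ne.2 h1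
      have e2 : (c == ',') = false := beq_eq_false_iff_ne.2 h2
      have e3 : (c == ';') = false := beq_eq_false_iff_ne.2 h3
      simp [e1, e2, e3, List.contains_eq_mem, h1, h2, h3])] <;>
    simp only [h1, h2, h3, List.contains_eq_mem, List.mem_cons, List.not_mem_nil, or_false] <;>
    simp

-- main simulation: A's loop+flush equals B's parse from any related states
lemma pv_sim (ls : List String) (pre : List String) :
    ∀ (segs : List PVSeg) (cur : List String),
    (let st := ls.foldl pvStepA (pre ++ segs.flatMap pvSegOut, cur)
     if st.2 ≠ [] then st.1 ++ st.2 else st.1)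
    = (let st := (ls.map PySem.Str.strip).foldl pvStepB (segs, cur)
       pre ++ st.1.flatMap pvSegOut ++ st.2) := by
  induction ls with
  | nil =>
    intro segs cur
    by_cases hc : cur = [] <;> simp [hc, List.append_assoc]
  | cons l ls ih =>
    intro segs cur
    simp only [List.foldl_cons, List.map_cons]
    by_cases hb : PySem.Str.strip l = ""
    · by_cases hc : cur = []
      · simp only [pvStepA, pvStepB, hb, hc, ne_eq, not_true_eq_false, if_false]
        exact ih segs []
      · have h1 : pvStepA (pre ++ segs.flatMap pvSegOut, cur) l
            = (pre ++ segs.flatMap pvSegOut ++ cur ++ [""], []) := by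
          simp [pvStepA, hb, hc]
        have h2 : pvStepB (segs, cur) (PySem.Str.strip l) = (segs ++ [.body cur], []) := by
          simp [pvStepB, hb, hc]
        rw [h1, h2]
        have := ih (segs ++ [.body cur]) []
        simpa [pvSegOut, List.append_assoc] using this
    · by_cases hh : pvHeadA (PySem.Str.strip l) = true
      · have hh' : pvHeadB (PySem.Str.strip l) = true := by rwa [← pvHead_eq _ hb]
        by_cases hc : cur = []
        · have h1 : pvStepA (pre ++ segs.flatMap pvSegOut, cur) l
              = (pre ++ segs.flatMap pvSegOut ++ ["## " ++ PySem.Str.strip l, ""], []) := by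
            simp [pvStepA, hb, hh, hc]
          have h2 : pvStepB (segs, cur) (PySem.Str.strip l)
              = (segs ++ [.heading (PySem.Str.strip l)], []) := by
            simp [pvStepB, hb, hh', hc]
          rw [h1, h2]
          have := ih (segs ++ [.heading (PySem.Str.strip l)]) []
          simpa [pvSegOut, List.append_assoc] using this
        · have h1 : pvStepA (pre ++ segs.flatMap pvSegOut, cur) l
              = (pre ++ segs.flatMap pvSegOut ++ cur ++ [""]
                  ++ ["## " ++ PySem.Str.strip l, ""], []) := by
            simp [pvStepA, hb, hh, hc, List.append_assoc]
          have h2 : pvStepB (segs, cur) (PySem.Str.strip l)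
              = (segs ++ [.body cur] ++ [.heading (PySem.Str.strip l)], []) := by
            simp [pvStepB, hb, hh', hc]
          rw [h1, h2]
          have := ih (segs ++ [.body cur] ++ [.heading (PySem.Str.strip l)]) []
          simpa [pvSegOut, List.append_assoc] using this
      · have hh' : pvHeadB (PySem.Str.strip l) = false := by
          rw [← pvHead_eq _ hb]; simpa using hh
        have h1 : pvStepA (pre ++ segs.flatMap pvSegOut, cur) l
            = (pre ++ segs.flatMap pvSegOut, cur ++ [PySem.Str.strip l]) := by
          simp [pvStepA, hb, hh]
        have h2 : pvStepB (segs, cur) (PySem.Str.strip l)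
            = (segs, cur ++ [PySem.Str.strip l]) := by
          simp [pvStepB, hb, hh']
        rw [h1, h2]
        exact ih segs (cur ++ [PySem.Str.strip l])

-- ===== VERDICT (by name: the statement is the Claim_ definition above) =====
theorem format_user_input_to_markdown_py_spec : Claim_equal_format_user_input_to_markdown_py := by
  intro user_text title _
  unfold Spec_format_user_input_to_markdown_py
  unfold format_user_input_to_markdown_py format_user_input_to_markdown_py_alt
  simp only
  rw [pvRender_flatMap]
  have := pv_sim ((PySem.Str.split? (PySem.Str.strip user_text) "\n").getD []) ["# " ++ title, ""] [] []
  simp only [List.flatMap_nil, List.append_nil] at this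
  rw [this]
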